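-- pv_equiv track=rewrite | github.com/apintodesignco/ALEJO | alejo/collective/improvement_engine.py | _calculate_wcag_level
-- ===== SOURCE A (Python) =====
-- from typing import List, Dict, Any, Optional, Tuple
--
-- def _calculate_wcag_level(insights: List[Dict]) -> str:
--     """Calculate WCAG compliance level from insights"""
--     # Default to AA if not specified
--     levels = [insight.get('wcag_level', 'AA') for insight in insights]
--
--     # If any insight requires AAA compliance, use that
--     if 'AAA' in levels:
--         return 'AAA'
--     # If any insight requires AA compliance, use that
--     elif 'AA' in levels:
--         return 'AA'
--     # Otherwise use A
--     else:
--         return 'A'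
-- ===== SOURCE B (Python) =====
-- def _calculate_wcag_level(insights):
--     """Calculate WCAG compliance level from insights (single pass, running max rank)."""
--     table = ['A', 'AA', 'AAA']
--     rank = {'AAA': 2, 'AA': 1}
--     best = 0
--     for insight in insights:
--         r = rank.get(insight.get('wcag_level', 'AA'), 0)
--         if r > best:
--             best = r
--     return table[best]
-- ===== Notes on version B (the rewrite author's own statement) =====
-- stated objective: simpler
-- what changed: Replaces building the full list of levels plus two membership scans with a single pass keeping a running maximum rank ('AAA'=2, 'AA'=1, other=0) and indexing a small table at the end.
import Mathlib
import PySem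

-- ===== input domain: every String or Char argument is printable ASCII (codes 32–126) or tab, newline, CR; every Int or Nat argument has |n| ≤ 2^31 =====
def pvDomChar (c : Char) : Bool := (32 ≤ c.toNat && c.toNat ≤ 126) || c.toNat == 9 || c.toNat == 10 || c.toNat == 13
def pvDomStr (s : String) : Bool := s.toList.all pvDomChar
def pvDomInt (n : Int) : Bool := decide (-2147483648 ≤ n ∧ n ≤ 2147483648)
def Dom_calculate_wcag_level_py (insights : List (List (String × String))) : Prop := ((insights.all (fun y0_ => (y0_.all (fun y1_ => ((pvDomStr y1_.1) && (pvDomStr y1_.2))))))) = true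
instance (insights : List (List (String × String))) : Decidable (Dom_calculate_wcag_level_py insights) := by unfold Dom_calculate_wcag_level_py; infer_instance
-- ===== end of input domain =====

-- B replaces A's intermediate list of all levels and its two membership scans by
-- a single pass keeping a running maximum rank, then one table lookup (objective: simpler).

-- ===== PORT A =====
def calculate_wcag_level_py (insights : List (List (String × String))) : String :=
  let levels := insights.map (fun insight => (PySem.Dict.mk insight).getD "wcag_level" "AA")
  if levels.contains "AAA" then "AAA"
  else if levels.contains "AA" then "AA"
  else "A"

-- ===== PORT B =====
def calculate_wcag_level_py_alt (insights : List (List (String × String))) : String :=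
  let table : List String := ["A", "AA", "AAA"]
  let rank : PySem.Dict String Int := PySem.Dict.mk [("AAA", 2), ("AA", 1)]
  let best : Int := insights.foldl (fun best insight =>
    let r := rank.getD ((PySem.Dict.mk insight).getD "wcag_level" "AA") 0
    if r > best then r else best) 0
  -- table[best]: best is provably in {0,1,2}; Python's IndexError is unreachable
  (PySem.List.pyGet? table best).getD "A"

-- ===== PRECONDITION & SPEC =====
def Spec_calculate_wcag_level_py (insights : List (List (String × String))) (out : String) : Prop := out = calculate_wcag_level_py_alt insights
instance (insights : List (List (String × String))) (out : String) : Decidable (Spec_calculate_wcag_level_py insights out) := by unfold Spec_calculate_wcag_level_py; infer_instance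

-- ===== CLAIM (what is proved, stated in full; the proofs are below) =====
def Claim_equal_calculate_wcag_level_py : Prop := ∀ (insights : List (List (String × String))), Dom_calculate_wcag_level_py insights → Spec_calculate_wcag_level_py insights (calculate_wcag_level_py insights)

-- ===== LEMMAS AND PROOFS =====

-- the level a row contributes (shared abbreviation for the proofs)
def pvLvl (insight : List (String × String)) : String :=
  (PySem.Dict.mk insight).getD "wcag_level" "AA"

-- B's rank-dict lookup, as an if-chain
def pvRk (s : String) : Int := if s = "AAA" then 2 else if s = "AA" then 1 else 0

theorem pvRk_eq (s : String) :
    (PySem.Dict.mk [("AAA", (2 : Int)), ("AA", 1)]).getD s 0 = pvRk s := by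
  by_cases h1 : s = "AAA"
  · simp [h1, pvRk, PySem.Dict.getD, PySem.Dict.get?_mk_cons]
  · have h1' : ("AAA" : String) ≠ s := fun h => h1 h.symm
    by_cases h2 : s = "AA"
    · simp [h2, pvRk, PySem.Dict.getD, PySem.Dict.get?_mk_cons]
    · have h2' : ("AA" : String) ≠ s := fun h => h2 h.symm
      simp [h1, h2, h1', h2', pvRk, PySem.Dict.getD, PySem.Dict.get?]

theorem pvRk_nonneg (s : String) : 0 ≤ pvRk s := by
  unfold pvRk; split_ifs <;> omega

-- recursive maximum of the ranks (the value B's running maximum computes)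
def pvAux : List (List (String × String)) → Int
  | [] => 0
  | d :: t => max (pvRk (pvLvl d)) (pvAux t)

theorem pvFold_eq (l : List (List (String × String))) (acc : Int) (hacc : 0 ≤ acc) :
    l.foldl (fun best insight =>
      let r := (PySem.Dict.mk [("AAA", (2 : Int)), ("AA", 1)]).getD
        ((PySem.Dict.mk insight).getD "wcag_level" "AA") 0
      if r > best then r else best) acc = max acc (pvAux l) := by
  induction l generalizing acc with
  | nil => simp [pvAux]; omega
  | cons d t ih =>
    have hr := pvRk_nonneg ((PySem.Dict.mk d).getD "wcag_level" "AA")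
    rw [List.foldl_cons]
    dsimp only
    rw [pvRk_eq, ih _ (by split_ifs <;> omega)]
    show _ = max acc (max (pvRk (pvLvl d)) (pvAux t))
    simp only [pvLvl]
    split_ifs <;> omega

theorem pvAux_char (l : List (List (String × String))) :
    pvAux l = if (l.map pvLvl).contains "AAA" then 2
      else if (l.map pvLvl).contains "AA" then 1 else 0 := by
  induction l with
  | nil => simp [pvAux]
  | cons d t ih =>
    by_cases hA : ∃ a ∈ t, pvLvl a = "AAA" <;>
    by_cases hB : ∃ a ∈ t, pvLvl a = "AA" <;>
    by_cases h1 : pvLvl d = "AAA" <;> by_cases h2 : pvLvl d = "AA" <;>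
      (simp [pvAux, ih, pvRk, h1, h2, hA, hB] <;> simp [Ne.symm h1, Ne.symm h2])

-- ===== VERDICT (by name: the statement is the Claim_ definition above) =====
theorem calculate_wcag_level_py_spec : Claim_equal_calculate_wcag_level_py := by
  intro insights _
  show _ = _
  unfold calculate_wcag_level_py calculate_wcag_level_py_alt
  dsimp only
  rw [pvFold_eq insights 0 le_rfl, pvAux_char]
  have h : (fun insight => (PySem.Dict.mk insight).getD "wcag_level" "AA") = pvLvl := rfl
  rw [h]
  split_ifs <;> simp [PySem.List.pyGet?, PySem.List.pyIdx?]
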